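-- pv_equiv track=rewrite | github.com/Anksss3d/Algorithms-in-Python | convex_hull.py | getLowestPt
-- ===== SOURCE A (Python) =====
-- def getLowestPt(pts):
--     pt = pts[0]
--     ind = 0
--     for i in range(0, len(pts)):
--         if pts[i][1] < pt[1]:
--             pt = pts[i]
--             ind = i
--     return pt
-- ===== SOURCE B (Python) =====
-- def getLowestPt(pts):
--     return sorted(pts, key=lambda p: p[1])[0]
-- ===== Notes on version B (the rewrite author's own statement) =====
-- stated objective: idiomatic
-- what changed: Replaces the manual index loop with a strict-less accumulator by a stable sort on the y-coordinate followed by selecting the first element; stability preserves A's first-among-ties result.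
import Mathlib
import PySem

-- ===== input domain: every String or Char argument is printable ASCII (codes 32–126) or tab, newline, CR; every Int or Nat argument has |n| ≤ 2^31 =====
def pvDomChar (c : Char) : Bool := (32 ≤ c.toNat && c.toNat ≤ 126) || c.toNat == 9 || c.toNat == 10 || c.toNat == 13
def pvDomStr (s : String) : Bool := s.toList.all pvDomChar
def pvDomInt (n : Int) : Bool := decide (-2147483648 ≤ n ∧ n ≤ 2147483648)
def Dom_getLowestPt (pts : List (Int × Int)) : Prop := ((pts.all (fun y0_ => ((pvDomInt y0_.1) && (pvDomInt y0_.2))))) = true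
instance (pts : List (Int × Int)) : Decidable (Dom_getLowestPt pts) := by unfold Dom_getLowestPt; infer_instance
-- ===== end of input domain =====

-- B replaces A's manual index loop by a stable sort on the y-coordinate followed by
-- selecting the first element (objective: idiomatic; not faster).

-- ===== PORT A =====
-- literal transliteration: pt = pts[0]; for i in range(0, len(pts)): if pts[i][1] < pt[1]: pt, ind = pts[i], i
def getLowestPt (pts : List (Int × Int)) : Int × Int :=
  let pt := PySem.List.pyGetD pts 0 ((0 : Int), (0 : Int))
  ((PySem.List.pyRange 0 (pts.length : Int) 1).foldl
    (fun (st : (Int × Int) × Int) i =>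
      if (PySem.List.pyGetD pts i ((0 : Int), (0 : Int))).2 < st.1.2 then
        (PySem.List.pyGetD pts i ((0 : Int), (0 : Int)), i)
      else st)
    (pt, 0)).1

-- ===== PORT B =====
-- literal transliteration of Source B: return sorted(pts, key=lambda p: p[1])[0]
def getLowestPt_alt (pts : List (Int × Int)) : Int × Int :=
  PySem.List.pyGetD (PySem.List.sorted pts (fun p => p.2) false) 0 ((0 : Int), (0 : Int))

-- ===== PRECONDITION & SPEC =====
-- Pre_ excludes only the empty list, on which A's pts[0] raises IndexError (B's [0] raises too).
def Pre_getLowestPt (pts : List (Int × Int)) : Prop := pts ≠ []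
instance (pts : List (Int × Int)) : Decidable (Pre_getLowestPt pts) := by unfold Pre_getLowestPt; infer_instance
def pvWitness_getLowestPt : (List (Int × Int)) := [((1 : Int), (2 : Int)), ((0 : Int), (-3 : Int))]

def Spec_getLowestPt (pts : List (Int × Int)) (out : Int × Int) : Prop := out = getLowestPt_alt pts
instance (pts : List (Int × Int)) (out : Int × Int) : Decidable (Spec_getLowestPt pts out) := by unfold Spec_getLowestPt; infer_instance

-- ===== CLAIM (what is proved, stated in full; the proofs are below) =====
def Claim_equal_getLowestPt : Prop := ∀ (pts : List (Int × Int)), Dom_getLowestPt pts → Pre_getLowestPt pts → Spec_getLowestPt pts (getLowestPt pts)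

-- ===== LEMMAS AND PROOFS =====

-- the common strict-less "keep the earlier one on ties" accumulator both programs realise
def pvStep (m p : Int × Int) : Int × Int := if p.2 < m.2 then p else m

-- A side: the fold carrying the unused index `ind` projects to the plain pvStep fold
theorem pv_fst_foldl_pair (pts : List (Int × Int)) :
    ∀ (l : List Int) (st : (Int × Int) × Int),
      (l.foldl
        (fun (st : (Int × Int) × Int) i =>
          if (PySem.List.pyGetD pts i ((0 : Int), (0 : Int))).2 < st.1.2 then
            (PySem.List.pyGetD pts i ((0 : Int), (0 : Int)), i)
          else st) st).1
      = l.foldl (fun m i => pvStep m (PySem.List.pyGetD pts i ((0 : Int), (0 : Int)))) st.1 := by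
  intro l
  induction l with
  | nil => intro st; rfl
  | cons i t ih =>
      intro st
      simp only [List.foldl_cons, pvStep]
      by_cases h : (PySem.List.pyGetD pts i ((0 : Int), (0 : Int))).2 < st.1.2
      · simp only [if_pos h]; exact ih _
      · simp only [if_neg h]; exact ih st

theorem pvA_eq_foldl (x : Int × Int) (xs : List (Int × Int)) :
    getLowestPt (x :: xs) = xs.foldl pvStep x := by
  unfold getLowestPt
  rw [pv_fst_foldl_pair]
  rw [PySem.List.foldl_pyRange_zero_pyGetD' (x :: xs) ((0 : Int), (0 : Int)) pvStep]
  simp [PySem.List.pyGetD_zero_cons, List.foldl_cons, pvStep]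

-- B side: the head of the insertion-sort fold is the pvStep fold of the elements
theorem pv_head_foldl_insertBy :
    ∀ (xs : List (Int × Int)) (m : Int × Int) (t : List (Int × Int)),
      ∃ t', xs.foldl
          (fun acc p => PySem.List.insertBy
            (fun a b : Int × Int => decide (a.2 < b.2)) p acc) (m :: t)
        = (xs.foldl pvStep m) :: t' := by
  intro xs
  induction xs with
  | nil => intro m t; exact ⟨t, rfl⟩
  | cons p rest ih =>
      intro m t
      simp only [List.foldl_cons]
      by_cases h : p.2 < m.2
      · have hins : PySem.List.insertBy (fun a b : Int × Int => decide (a.2 < b.2)) p (m :: t)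
            = p :: m :: t := by simp [PySem.List.insertBy, h]
        rw [hins]
        have := ih p (m :: t)
        simpa [pvStep, h] using this
      · have hins : PySem.List.insertBy (fun a b : Int × Int => decide (a.2 < b.2)) p (m :: t)
            = m :: PySem.List.insertBy (fun a b : Int × Int => decide (a.2 < b.2)) p t := by
          simp [PySem.List.insertBy, h]
        rw [hins]
        have := ih m (PySem.List.insertBy (fun a b : Int × Int => decide (a.2 < b.2)) p t)
        simpa [pvStep, h] using this

theorem pvB_eq_foldl (x : Int × Int) (xs : List (Int × Int)) :
    getLowestPt_alt (x :: xs) = xs.foldl pvStep x := by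
  unfold getLowestPt_alt
  rw [PySem.List.sorted_eq_foldl_insertBy]
  simp only [List.foldl_cons]
  have h0 : PySem.List.insertBy (fun a b : Int × Int => decide (a.2 < b.2)) x ([] : List (Int × Int))
      = [x] := by simp [PySem.List.insertBy]
  rw [h0]
  obtain ⟨t', ht'⟩ := pv_head_foldl_insertBy xs x []
  rw [ht']
  simp [PySem.List.pyGetD_zero_cons]

-- ===== VERDICT (by name: the statement is the Claim_ definition above) =====
theorem getLowestPt_spec : Claim_equal_getLowestPt := by
  intro pts _ hpre
  unfold Spec_getLowestPt
  cases pts with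
  | nil => exact absurd rfl hpre
  | cons x xs => rw [pvA_eq_foldl, pvB_eq_foldl]
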